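-- pv_equiv track=rewrite | github.com/APE-147/singlefile-archiver | src/singlefile_archiver/utils/paths.py | _find_optimal_truncation_point
-- ===== SOURCE A (Python) =====
-- def _find_optimal_truncation_point(title: str, target_length: int) -> int:
--     """Find the optimal point to truncate text, preferring word boundaries.
--
--     Args:
--         title: Text to truncate
--         target_length: Target length for truncation
--
--     Returns:
--         Position to truncate at
--     """
--     if len(title) <= target_length:
--         return len(title)
--
--     # Look for word boundaries near the target length
--     search_start = max(0, target_length - 15)
--     search_end = min(len(title), target_length + 5)
--
--     # Find the best word boundary within the search range
--     best_pos = target_length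
--
--     # Look for sentence endings first (periods, exclamation, question marks)
--     for pos in range(search_end - 1, search_start - 1, -1):
--         if pos < len(title) and title[pos] in '.!?':
--             if pos <= target_length - 2:  # Leave room for "..."
--                 return pos + 1
--
--     # Look for clause boundaries (commas, colons, semicolons)
--     for pos in range(search_end - 1, search_start - 1, -1):
--         if pos < len(title) and title[pos] in ',:;':
--             if pos <= target_length - 2:
--                 return pos + 1
--
--     # Look for word boundaries (spaces)
--     for pos in range(target_length, search_start - 1, -1):
--         if pos < len(title) and title[pos] == ' ':
--             return pos
--
--     # If no good boundary found, use target length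
--     return target_length
-- ===== SOURCE B (Python) =====
-- def _find_optimal_truncation_point(title: str, target_length: int) -> int:
--     """Single forward pass: record the rightmost candidate of each class,
--     then resolve by priority (sentence end > clause break > space)."""
--     if len(title) <= target_length:
--         return len(title)
--
--     search_start = max(0, target_length - 15)
--     search_end = min(len(title), target_length + 5)
--
--     sent = clause = space = None
--     for pos in range(search_start, search_end):
--         c = title[pos]
--         if pos <= target_length - 2:
--             if c in '.!?':
--                 sent = pos
--             elif c in ',:;':
--                 clause = pos
--         if c == ' ' and pos <= target_length:
--             space = pos
--
--     if sent is not None: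
--         return sent + 1
--     if clause is not None:
--         return clause + 1
--     if space is not None:
--         return space
--     return target_length
-- ===== Notes on version B (the rewrite author's own statement) =====
-- stated objective: alternative
-- what changed: Replaces A's three separate backward scans with early return by a single forward pass that records the rightmost candidate of each class (sentence end, clause break, space) and resolves by priority afterwards.
import Mathlib
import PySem

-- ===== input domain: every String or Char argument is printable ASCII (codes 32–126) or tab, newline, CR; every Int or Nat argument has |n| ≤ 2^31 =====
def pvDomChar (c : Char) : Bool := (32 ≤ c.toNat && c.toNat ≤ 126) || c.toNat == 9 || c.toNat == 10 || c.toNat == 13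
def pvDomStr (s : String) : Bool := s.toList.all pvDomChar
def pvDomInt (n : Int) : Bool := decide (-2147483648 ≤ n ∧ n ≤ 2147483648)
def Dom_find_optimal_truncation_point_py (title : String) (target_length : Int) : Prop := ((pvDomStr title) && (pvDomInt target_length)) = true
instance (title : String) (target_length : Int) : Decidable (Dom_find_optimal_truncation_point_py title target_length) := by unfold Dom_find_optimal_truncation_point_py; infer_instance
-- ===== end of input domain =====

-- B replaces A's three backward scans (each with early return) by ONE forward pass that
-- records the rightmost candidate of each class and resolves by priority afterwards (alternative decomposition, same cost).

-- shared helper: Python's `c in '<chars>'` membership test for a (possibly absent) character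
def pvCharIn (s : String) (c : Option Char) : Bool :=
  match c with
  | some ch => s.toList.contains ch
  | none => false

-- ===== PORT A =====
def find_optimal_truncation_point_py (title : String) (target_length : Int) : Int :=
  let n := PySem.Str.len title
  if n ≤ target_length then n
  else
    let search_start := max 0 (target_length - 15)
    let search_end := min n (target_length + 5)
    -- loop 1: sentence endings, scanning downwards, early return pos+1
    match (PySem.List.pyRange (search_end - 1) (search_start - 1) (-1)).find?
        (fun pos => decide (pos < n) && pvCharIn ".!?" (PySem.Str.pyGet? title pos)
                      && decide (pos ≤ target_length - 2)) with
    | some pos => pos + 1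
    | none =>
      -- loop 2: clause boundaries
      match (PySem.List.pyRange (search_end - 1) (search_start - 1) (-1)).find?
          (fun pos => decide (pos < n) && pvCharIn ",:;" (PySem.Str.pyGet? title pos)
                        && decide (pos ≤ target_length - 2)) with
      | some pos => pos + 1
      | none =>
        -- loop 3: spaces
        match (PySem.List.pyRange target_length (search_start - 1) (-1)).find?
            (fun pos => decide (pos < n) && decide (PySem.Str.pyGet? title pos = some ' ')) with
        | some pos => pos
        | none => target_length

-- ===== PORT B =====
-- one step of B's single forward pass: state = (sent, clause, space) rightmost candidates
def pvStepB (title : String) (target_length : Int)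
    (st : Option Int × Option Int × Option Int) (pos : Int) :
    Option Int × Option Int × Option Int :=
  let c := PySem.Str.pyGet? title pos
  let sc :=
    if pos ≤ target_length - 2 then
      if pvCharIn ".!?" c then (some pos, st.2.1)
      else if pvCharIn ",:;" c then (st.1, some pos)
      else (st.1, st.2.1)
    else (st.1, st.2.1)
  let space := if c = some ' ' ∧ pos ≤ target_length then some pos else st.2.2
  (sc.1, sc.2, space)

def find_optimal_truncation_point_py_alt (title : String) (target_length : Int) : Int :=
  let n := PySem.Str.len title
  if n ≤ target_length then n
  else
    let search_start := max 0 (target_length - 15)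
    let search_end := min n (target_length + 5)
    match (PySem.List.pyRange search_start search_end 1).foldl
        (pvStepB title target_length) (none, none, none) with
    | (some p, _, _) => p + 1
    | (none, some p, _) => p + 1
    | (none, none, some p) => p
    | (none, none, none) => target_length

-- ===== PRECONDITION & SPEC =====
def Spec_find_optimal_truncation_point_py (title : String) (target_length : Int) (out : Int) : Prop := out = find_optimal_truncation_point_py_alt title target_length
instance (title : String) (target_length : Int) (out : Int) : Decidable (Spec_find_optimal_truncation_point_py title target_length out) := by unfold Spec_find_optimal_truncation_point_py; infer_instance

-- ===== CLAIM (what is proved, stated in full; the proofs are below) =====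
def Claim_equal_find_optimal_truncation_point_py : Prop := ∀ (title : String) (target_length : Int), Dom_find_optimal_truncation_point_py title target_length → Spec_find_optimal_truncation_point_py title target_length (find_optimal_truncation_point_py title target_length)

-- ===== LEMMAS AND PROOFS =====

-- a "record the last satisfying element" fold equals find? on the reversed list
theorem pvFoldl_lastSat (p : Int → Bool) :
    ∀ (l : List Int) (acc : Option Int),
      l.foldl (fun a x => if p x then some x else a) acc = (l.reverse.find? p).or acc := by
  intro l
  induction l with
  | nil => intro acc; simp
  | cons x t ih =>
    intro acc
    simp only [List.foldl_cons, ih, List.reverse_cons, List.find?_append]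
    cases h : t.reverse.find? p with
    | some y => simp [Option.or]
    | none =>
      simp only [Option.or]
      cases hx : p x <;> simp [List.find?, hx]

-- B's combined step decomposes componentwise
theorem pvStepB_components (title : String) (tl : Int) (st : Option Int × Option Int × Option Int)
    (pos : Int) :
    pvStepB title tl st pos =
      ((if (decide (pos ≤ tl - 2) && pvCharIn ".!?" (PySem.Str.pyGet? title pos)) then some pos else st.1),
       (if (decide (pos ≤ tl - 2) && !pvCharIn ".!?" (PySem.Str.pyGet? title pos)
              && pvCharIn ",:;" (PySem.Str.pyGet? title pos)) then some pos else st.2.1),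
       (if (decide (PySem.Str.pyGet? title pos = some ' ') && decide (pos ≤ tl)) then some pos else st.2.2)) := by
  rcases st with ⟨s, c, sp⟩
  unfold pvStepB
  generalize PySem.Str.pyGet? title pos = g
  split_ifs <;> simp_all [pvCharIn] <;> omega

-- the triple fold is the triple of independent "last satisfying" folds
theorem pvFoldB_split (title : String) (tl : Int) :
    ∀ (l : List Int) (s c sp : Option Int),
      l.foldl (pvStepB title tl) (s, c, sp) =
        (l.foldl (fun a x => if (decide (x ≤ tl - 2) && pvCharIn ".!?" (PySem.Str.pyGet? title x)) then some x else a) s,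
         l.foldl (fun a x => if (decide (x ≤ tl - 2) && !pvCharIn ".!?" (PySem.Str.pyGet? title x)
                                    && pvCharIn ",:;" (PySem.Str.pyGet? title x)) then some x else a) c,
         l.foldl (fun a x => if (decide (PySem.Str.pyGet? title x = some ' ') && decide (x ≤ tl)) then some x else a) sp) := by
  intro l
  induction l with
  | nil => intro s c sp; simp
  | cons x t ih =>
    intro s c sp
    simp only [List.foldl_cons, pvStepB_components, ih]

-- find? is determined by the predicate's values on members
theorem pvFind?_congr (p q : Int → Bool) :
    ∀ (l : List Int), (∀ x ∈ l, p x = q x) → l.find? p = l.find? q := by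
  intro l
  induction l with
  | nil => intro _; rfl
  | cons x t ih =>
    intro h
    have hx := h x (by simp)
    simp only [List.find?]
    rw [hx]
    cases q x with
    | true => rfl
    | false => exact ih (fun y hy => h y (by simp [hy]))

theorem find_optimal_truncation_point_py_spec : Claim_equal_find_optimal_truncation_point_py := by
  intro title tl _
  unfold Spec_find_optimal_truncation_point_py
  unfold find_optimal_truncation_point_py find_optimal_truncation_point_py_alt
  set n := PySem.Str.len title with hn
  by_cases hguard : n ≤ tl
  · simp [hguard]
  · simp only [if_neg hguard]
    have hnn : 0 ≤ n := by
      simpa [hn] using PySem.Str.len_nonneg title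
    have htl_lt : tl < n := lt_of_not_ge hguard
    set ss := max 0 (tl - 15) with hss
    set se := min n (tl + 5) with hse
    have hss0 : 0 ≤ ss := le_max_left _ _
    have hsen : se ≤ n := min_le_left _ _
    -- rewrite B's fold into three find? over the reversed ascending range
    rw [pvFoldB_split, pvFoldl_lastSat, pvFoldl_lastSat, pvFoldl_lastSat]
    -- descending ranges are reverses of ascending ones
    have hrev : PySem.List.pyRange (se - 1) (ss - 1) (-1) = (PySem.List.pyRange ss se 1).reverse := by
      have h := PySem.List.pyRange_neg_one_eq_reverse (se - 1) (ss - 1)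
      simpa using h
    have hrevsp : PySem.List.pyRange tl (ss - 1) (-1) = (PySem.List.pyRange ss (tl + 1) 1).reverse := by
      have := PySem.List.pyRange_neg_one_eq_reverse tl (ss - 1)
      simpa using this
    -- members of the scanned (reversed) range are valid indices
    have hmem : ∀ x ∈ (PySem.List.pyRange ss se 1).reverse, ss ≤ x ∧ x < se := by
      intro x hx
      rw [List.mem_reverse, PySem.List.mem_pyRange_one] at hx
      exact hx
    -- sentence find? agreement
    have hsent :
        (PySem.List.pyRange (se - 1) (ss - 1) (-1)).find?
            (fun pos => decide (pos < n) && pvCharIn ".!?" (PySem.Str.pyGet? title pos)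
                          && decide (pos ≤ tl - 2))
          = ((PySem.List.pyRange ss se 1).reverse.find?
            (fun x => decide (x ≤ tl - 2) && pvCharIn ".!?" (PySem.Str.pyGet? title x))) := by
      rw [hrev]
      apply pvFind?_congr
      intro x hx
      have hb := hmem x hx
      have hxn : x < n := lt_of_lt_of_le hb.2 hsen
      generalize PySem.Str.pyGet? title x = g
      by_cases h2 : x ≤ tl - 2 <;> cases hc : pvCharIn ".!?" g <;>
        simp [hxn, h2, hc]

    rw [hsent]
    cases hfind1 : ((PySem.List.pyRange ss se 1).reverse.find?
        (fun x => decide (x ≤ tl - 2) && pvCharIn ".!?" (PySem.Str.pyGet? title x))) with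
    | some p => simp [Option.or]
    | none =>
      simp only [Option.or]
      -- no sentence char in range within bound: clause predicates agree
      have hnone1 := List.find?_eq_none.mp hfind1
      have hclause :
          (PySem.List.pyRange (se - 1) (ss - 1) (-1)).find?
              (fun pos => decide (pos < n) && pvCharIn ",:;" (PySem.Str.pyGet? title pos)
                            && decide (pos ≤ tl - 2))
            = ((PySem.List.pyRange ss se 1).reverse.find?
              (fun x => decide (x ≤ tl - 2) && !pvCharIn ".!?" (PySem.Str.pyGet? title x)
                          && pvCharIn ",:;" (PySem.Str.pyGet? title x))) := by
        rw [hrev]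
        apply pvFind?_congr
        intro x hx
        have hb := hmem x hx
        have hxn : x < n := lt_of_lt_of_le hb.2 hsen
        have hns := hnone1 x hx
        by_cases h2 : x ≤ tl - 2
        · have hfalse : pvCharIn ".!?" (PySem.Str.pyGet? title x) = false := by
            cases hc : pvCharIn ".!?" (PySem.Str.pyGet? title x)
            · rfl
            · exfalso; apply hns; rw [hc]; simp [h2]
          revert hfalse
          generalize PySem.Str.pyGet? title x = g
          intro hfalse
          cases hc2 : pvCharIn ",:;" g <;> simp [hxn, h2, hc2, hfalse]
        · simp [h2]
      rw [hclause]
      cases hfind2 : ((PySem.List.pyRange ss se 1).reverse.find?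
          (fun x => decide (x ≤ tl - 2) && !pvCharIn ".!?" (PySem.Str.pyGet? title x)
                      && pvCharIn ",:;" (PySem.Str.pyGet? title x))) with
      | some p => simp [Option.or]
      | none =>
        simp only [Option.or]
        -- space scans agree
        have hspace :
            (PySem.List.pyRange tl (ss - 1) (-1)).find?
                (fun pos => decide (pos < n) && decide (PySem.Str.pyGet? title pos = some ' '))
              = ((PySem.List.pyRange ss se 1).reverse.find?
                (fun x => decide (PySem.Str.pyGet? title x = some ' ') && decide (x ≤ tl))) := by
          rw [hrevsp]
          by_cases hcase : ss ≤ tl + 1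
          · -- split the ascending range at tl+1
            have h2 : tl + 1 ≤ se := by
              simp only [hse, le_min_iff]
              constructor
              · omega
              · omega
            rw [PySem.List.pyRange_one_append ss (tl + 1) se hcase h2]
            rw [List.reverse_append, List.find?_append]
            have hhigh : (PySem.List.pyRange (tl + 1) se 1).reverse.find?
                (fun x => decide (PySem.Str.pyGet? title x = some ' ') && decide (x ≤ tl)) = none := by
              apply List.find?_eq_none.mpr
              intro x hx
              rw [List.mem_reverse, PySem.List.mem_pyRange_one] at hx
              simp only [Bool.and_eq_true, decide_eq_true_eq, not_and]
              intro _
              omega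
            rw [hhigh]
            simp only [Option.none_or]
            apply pvFind?_congr
            intro x hx
            rw [List.mem_reverse, PySem.List.mem_pyRange_one] at hx
            have hxn : x < n := by omega
            have hxtl : x ≤ tl := by omega
            generalize PySem.Str.pyGet? title x = g
            simp [hxn, hxtl, Bool.and_comm]
          · -- tl + 1 < ss: both sides find nothing
            have h1 : PySem.List.pyRange ss (tl + 1) 1 = [] :=
              PySem.List.pyRange_one_eq_nil (by omega)
            rw [h1]
            simp only [List.reverse_nil, List.find?_nil]
            symm
            apply List.find?_eq_none.mpr
            intro x hx
            rw [List.mem_reverse, PySem.List.mem_pyRange_one] at hx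
            simp only [Bool.and_eq_true, decide_eq_true_eq, not_and]
            intro _
            omega
        rw [hspace]
        cases hfind3 : ((PySem.List.pyRange ss se 1).reverse.find?
            (fun x => decide (PySem.Str.pyGet? title x = some ' ') && decide (x ≤ tl))) with
        | some p => simp [Option.or]
        | none => simp [Option.or]
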